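-- pv_equiv track=rewrite | github.com/yingshaoxo/auto_everything | auto_everything/ml.py | get_time_series_data_from_a_list
-- ===== SOURCE A (Python) =====
-- def get_time_series_data_from_a_list(the_list, sequence_length):
--     """
--     Get sub sequences for LSTM network.
--
--     Parameters
--     ----------
--     the_list:
--     sequence_length: int
--         how long you want the subsequence to be.
--
--     Returns
--     -------
--     tuple
--         return ([features], [labels])
--     """
--     assert len(the_list) >= sequence_length + 1, "len(the_list) should >= sequence_length + 1"
--     array_1d = []
--     array_2d = []
--     array_target = []
--     for element in the_list:
--         array_1d.append(element)
--         if len(array_1d) == sequence_length + 1: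
--             target = array_1d.pop()
--             array_target.append(target)
--             array_2d.append(array_1d.copy())
--             array_1d.clear()
--     return array_2d, array_target
-- ===== SOURCE B (Python) =====
-- def get_time_series_data_from_a_list(the_list, sequence_length):
--     assert len(the_list) >= sequence_length + 1, "len(the_list) should >= sequence_length + 1"
--     step = sequence_length + 1
--     num = len(the_list) // step if step > 0 else 0
--     features = [the_list[k * step : k * step + sequence_length] for k in range(num)]
--     labels = [the_list[k * step + sequence_length] for k in range(num)]
--     return features, labels
-- ===== Notes on version B (the rewrite author's own statement) =====
-- stated objective: simpler
-- what changed: Replaced the append/pop/clear running-buffer loop with direct index arithmetic: num = len//(sequence_length+1) complete blocks, features/labels built by slicing each block, remainder discarded by integer division (slicing in C instead of per-element appends).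
-- outside the precondition, e.g. on get_time_series_data_from_a_list([], 1): A raises AssertionError, B raises AssertionError
import Mathlib
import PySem

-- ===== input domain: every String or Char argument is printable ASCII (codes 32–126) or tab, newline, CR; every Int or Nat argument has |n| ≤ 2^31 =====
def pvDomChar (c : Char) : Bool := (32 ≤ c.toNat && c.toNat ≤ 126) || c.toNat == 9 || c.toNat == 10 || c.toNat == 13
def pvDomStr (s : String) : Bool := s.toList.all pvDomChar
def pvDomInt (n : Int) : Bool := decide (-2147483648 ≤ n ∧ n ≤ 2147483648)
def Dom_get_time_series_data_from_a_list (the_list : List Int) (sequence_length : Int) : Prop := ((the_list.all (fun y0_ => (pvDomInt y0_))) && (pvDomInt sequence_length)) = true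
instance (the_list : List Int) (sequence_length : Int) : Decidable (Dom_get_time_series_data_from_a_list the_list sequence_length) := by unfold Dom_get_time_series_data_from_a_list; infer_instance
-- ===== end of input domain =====

-- B replaces A's append/pop/clear running buffer by direct index arithmetic over the
-- len//(sequence_length+1) complete blocks (simpler decomposition; same O(n) cost).

-- ===== PORT A =====
-- fold state: (array_1d, array_2d, array_target)
def get_time_series_data_from_a_list (the_list : List Int) (sequence_length : Int) : List (List Int) × List Int :=
  let s := the_list.foldl
    (fun (st : List Int × List (List Int) × List Int) element =>
      let a1 := st.1 ++ [element]
      if (a1.length : Int) = sequence_length + 1 then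
        ([], st.2.1 ++ [a1.dropLast], st.2.2 ++ [a1.getLastD 0])
      else (a1, st.2.1, st.2.2))
    ([], [], [])
  (s.2.1, s.2.2)

-- ===== PORT B =====
def get_time_series_data_from_a_list_alt (the_list : List Int) (sequence_length : Int) : List (List Int) × List Int :=
  let step := sequence_length + 1
  let num : Int := if 0 < step then PySem.Int.floordiv (the_list.length : Int) step else 0
  let features := (PySem.List.pyRange 0 num 1).map
    (fun k => PySem.List.slice the_list (some (k * step)) (some (k * step + sequence_length)))
  let labels := (PySem.List.pyRange 0 num 1).map
    (fun k => PySem.List.pyGetD the_list (k * step + sequence_length) 0)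
  (features, labels)

-- ===== PRECONDITION & SPEC =====
-- A's assert: len(the_list) >= sequence_length + 1 (AssertionError otherwise)
def Pre_get_time_series_data_from_a_list (the_list : List Int) (sequence_length : Int) : Prop :=
  sequence_length + 1 ≤ (the_list.length : Int)
instance (the_list : List Int) (sequence_length : Int) : Decidable (Pre_get_time_series_data_from_a_list the_list sequence_length) := by unfold Pre_get_time_series_data_from_a_list; infer_instance

def pvWitness_get_time_series_data_from_a_list : List Int × Int := ([1, 2, 3, 4, 5], 1)

def Spec_get_time_series_data_from_a_list (the_list : List Int) (sequence_length : Int) (out : List (List Int) × List Int) : Prop := out = get_time_series_data_from_a_list_alt the_list sequence_length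
instance (the_list : List Int) (sequence_length : Int) (out : List (List Int) × List Int) : Decidable (Spec_get_time_series_data_from_a_list the_list sequence_length out) := by unfold Spec_get_time_series_data_from_a_list; infer_instance

-- ===== CLAIM (what is proved, stated in full; the proofs are below) =====
def Claim_equal_get_time_series_data_from_a_list : Prop := ∀ (the_list : List Int) (sequence_length : Int), Dom_get_time_series_data_from_a_list the_list sequence_length → Pre_get_time_series_data_from_a_list the_list sequence_length → Spec_get_time_series_data_from_a_list the_list sequence_length (get_time_series_data_from_a_list the_list sequence_length)

-- ===== LEMMAS AND PROOFS =====

-- the reference chunk decomposition both ports are reduced to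
def chunksF (seqn : Nat) (xs : List Int) : List (List Int) :=
  if _h : xs.length < seqn + 1 then []
  else xs.take seqn :: chunksF seqn (xs.drop (seqn + 1))
termination_by xs.length
decreasing_by simp; omega

def chunksL (seqn : Nat) (xs : List Int) : List Int :=
  if _h : xs.length < seqn + 1 then []
  else xs.getD seqn 0 :: chunksL seqn (xs.drop (seqn + 1))
termination_by xs.length
decreasing_by simp; omega

lemma chunksF_cons (seqn : Nat) (xs : List Int) (h : ¬ xs.length < seqn + 1) :
    chunksF seqn xs = xs.take seqn :: chunksF seqn (xs.drop (seqn + 1)) := by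
  rw [chunksF]; rw [dif_neg h]

lemma chunksL_cons (seqn : Nat) (xs : List Int) (h : ¬ xs.length < seqn + 1) :
    chunksL seqn xs = xs.getD seqn 0 :: chunksL seqn (xs.drop (seqn + 1)) := by
  rw [chunksL]; rw [dif_neg h]

-- abbreviation for A's loop body
def stepA (sequence_length : Int) (st : List Int × List (List Int) × List Int) (element : Int) :
    List Int × List (List Int) × List Int :=
  let a1 := st.1 ++ [element]
  if (a1.length : Int) = sequence_length + 1 then
    ([], st.2.1 ++ [a1.dropLast], st.2.2 ++ [a1.getLastD 0])
  else (a1, st.2.1, st.2.2)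

lemma foldA_eq (the_list : List Int) (sequence_length : Int) :
    get_time_series_data_from_a_list the_list sequence_length =
      ((the_list.foldl (stepA sequence_length) ([], [], [])).2.1,
       (the_list.foldl (stepA sequence_length) ([], [], [])).2.2) := by
  rfl

-- A's loop never fires while the buffer stays shorter than seqn+1
lemma foldA_small (seqn : Nat) :
    ∀ (xs buf : List Int) (F : List (List Int)) (T : List Int),
      buf.length + xs.length < seqn + 1 →
      xs.foldl (stepA (seqn : Int)) (buf, F, T) = (buf ++ xs, F, T) := by
  intro xs
  induction xs with
  | nil => intro buf F T _; simp
  | cons x xs ih =>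
      intro buf F T h
      simp only [List.foldl_cons]
      have hne : ¬ (((buf ++ [x]).length : Int) = (seqn : Int) + 1) := by
        simp only [List.length_append, List.length_cons, List.length_nil] at h ⊢
        omega
      simp only [stepA, if_neg hne]
      rw [ih (buf ++ [x]) F T
        (by simp only [List.length_append, List.length_cons, List.length_nil] at h ⊢; omega)]
      simp

-- with a non-positive step the loop never fires at all
lemma foldA_neg (sequence_length : Int) (hneg : sequence_length + 1 ≤ 0) :
    ∀ (xs buf : List Int) (F : List (List Int)) (T : List Int),
      xs.foldl (stepA sequence_length) (buf, F, T) = (buf ++ xs, F, T) := by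
  intro xs
  induction xs with
  | nil => intro buf F T; simp
  | cons x xs ih =>
      intro buf F T
      simp only [List.foldl_cons]
      have hne : ¬ (((buf ++ [x]).length : Int) = sequence_length + 1) := by
        have : (1 : Int) ≤ ((buf ++ [x]).length : Int) := by
          simp only [List.length_append, List.length_cons, List.length_nil]; omega
        omega
      simp only [stepA, if_neg hne]
      rw [ih]
      simp

-- A's fold from an empty buffer produces exactly the chunk decomposition
lemma foldA_chunks (seqn : Nat) :
    ∀ (xs : List Int) (F : List (List Int)) (T : List Int),
      ∃ rem, xs.foldl (stepA (seqn : Int)) ([], F, T) =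
        (rem, F ++ chunksF seqn xs, T ++ chunksL seqn xs) := by
  intro xs
  induction hn : xs.length using Nat.strong_induction_on generalizing xs with
  | _ n ih =>
    subst hn
    intro F T
    by_cases hlt : xs.length < seqn + 1
    · refine ⟨xs, ?_⟩
      rw [foldA_small seqn xs [] F T (by simpa using hlt)]
      rw [chunksF, chunksL]
      simp only [dif_pos hlt, List.append_nil, List.nil_append]
    · rw [not_lt] at hlt
      have hseq : seqn < xs.length := by omega
      have hxs : xs = xs.take seqn ++ xs[seqn] :: xs.drop (seqn + 1) := by
        conv_lhs => rw [← List.take_append_drop seqn xs]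
        rw [List.drop_eq_getElem_cons hseq]
      have hstep : stepA (seqn : Int) (xs.take seqn, F, T) xs[seqn] =
          ([], F ++ [xs.take seqn], T ++ [xs[seqn]]) := by
        have hlen : ((((xs.take seqn) ++ [xs[seqn]]).length : Nat) : Int) = (seqn : Int) + 1 := by
          simp only [List.length_append, List.length_take, List.length_cons, List.length_nil]
          omega
        simp only [stepA, hlen, if_pos]
        rw [List.dropLast_concat, List.getLastD_concat]
      obtain ⟨rem, hrem⟩ := ih ((xs.drop (seqn + 1)).length)
        (by simp; omega) (xs.drop (seqn + 1)) rfl (F ++ [xs.take seqn]) (T ++ [xs[seqn]])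
      refine ⟨rem, ?_⟩
      conv_lhs => rw [hxs]
      rw [List.foldl_append, foldA_small seqn (xs.take seqn) [] F T
        (by simp only [List.length_nil, List.length_take, Nat.zero_add]; omega)]
      simp only [List.nil_append, List.foldl_cons, hstep, hrem]
      rw [chunksF_cons seqn xs (by omega), chunksL_cons seqn xs (by omega)]
      simp [List.append_assoc, List.getD_eq_getElem?_getD, List.getElem?_eq_getElem hseq]

-- normalise B to maps over List.range with Nat arithmetic
lemma alt_eq (seqn : Nat) (xs : List Int) :
    get_time_series_data_from_a_list_alt xs (seqn : Int) =
      ((List.range (xs.length / (seqn + 1))).map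
          (fun i => (xs.drop (i * (seqn + 1))).take seqn),
       (List.range (xs.length / (seqn + 1))).map
          (fun i => xs.getD (i * (seqn + 1) + seqn) 0)) := by
  unfold get_time_series_data_from_a_list_alt
  have hpos : (0 : Int) < (seqn : Int) + 1 := by omega
  simp only [if_pos hpos]
  have hfd : PySem.Int.floordiv (xs.length : Int) ((seqn : Int) + 1) =
      ((xs.length / (seqn + 1) : Nat) : Int) := by
    have h : ((seqn : Int) + 1) = ((seqn + 1 : Nat) : Int) := by push_cast; ring
    rw [h, PySem.Int.floordiv_natCast]
  rw [hfd, PySem.List.pyRange_zero_natCast]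
  simp only [List.map_map]
  refine congrArg₂ Prod.mk ?_ ?_
  · apply List.map_congr_left
    intro i _
    simp only [Function.comp]
    have h1 : ((i : Int) * ((seqn : Int) + 1)) = ((i * (seqn + 1) : Nat) : Int) := by
      push_cast; ring
    rw [h1, PySem.List.slice_natCast_add]
  · apply List.map_congr_left
    intro i _
    simp only [Function.comp]
    have h2 : ((i : Int) * ((seqn : Int) + 1) + (seqn : Int)) =
        ((i * (seqn + 1) + seqn : Nat) : Int) := by push_cast; ring
    rw [h2, PySem.List.pyGetD_natCast]

lemma range_chunksF (seqn : Nat) :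
    ∀ (xs : List Int),
      (List.range (xs.length / (seqn + 1))).map
        (fun i => (xs.drop (i * (seqn + 1))).take seqn) = chunksF seqn xs := by
  intro xs
  induction hn : xs.length using Nat.strong_induction_on generalizing xs with
  | _ n ih =>
    subst hn
    by_cases hlt : xs.length < seqn + 1
    · rw [Nat.div_eq_of_lt hlt, chunksF]
      simp [hlt]
    · rw [not_lt] at hlt
      have hdiv : xs.length / (seqn + 1) = (xs.length - (seqn + 1)) / (seqn + 1) + 1 :=
        Nat.div_eq_sub_div (by omega) hlt
      rw [hdiv, List.range_succ_eq_map, List.map_cons, List.map_map, chunksF]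
      simp only [dif_neg (by omega : ¬ xs.length < seqn + 1)]
      congr 1
      · simp
      · rw [show xs.length - (seqn + 1) = (xs.drop (seqn + 1)).length by simp]
        rw [← ih ((xs.drop (seqn + 1)).length) (by simp; omega) _ rfl]
        apply List.map_congr_left
        intro i _
        simp only [Function.comp]
        rw [List.drop_drop]
        congr 2
        simp only [Nat.succ_eq_add_one]
        ring

lemma range_chunksL (seqn : Nat) :
    ∀ (xs : List Int),
      (List.range (xs.length / (seqn + 1))).map
        (fun i => xs.getD (i * (seqn + 1) + seqn) 0) = chunksL seqn xs := by
  intro xs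
  induction hn : xs.length using Nat.strong_induction_on generalizing xs with
  | _ n ih =>
    subst hn
    by_cases hlt : xs.length < seqn + 1
    · rw [Nat.div_eq_of_lt hlt, chunksL]
      simp [hlt]
    · rw [not_lt] at hlt
      have hdiv : xs.length / (seqn + 1) = (xs.length - (seqn + 1)) / (seqn + 1) + 1 :=
        Nat.div_eq_sub_div (by omega) hlt
      rw [hdiv, List.range_succ_eq_map, List.map_cons, List.map_map, chunksL]
      simp only [dif_neg (by omega : ¬ xs.length < seqn + 1)]
      congr 1
      · simp
      · rw [show xs.length - (seqn + 1) = (xs.drop (seqn + 1)).length by simp]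
        rw [← ih ((xs.drop (seqn + 1)).length) (by simp; omega) _ rfl]
        apply List.map_congr_left
        intro i _
        simp only [Function.comp]
        rw [List.getD_eq_getElem?_getD, List.getD_eq_getElem?_getD, List.getElem?_drop]
        congr 2
        simp only [Nat.succ_eq_add_one]
        ring

-- ===== VERDICT (by name: the statement is the Claim_ definition above) =====
theorem get_time_series_data_from_a_list_spec : Claim_equal_get_time_series_data_from_a_list := by
  intro the_list sequence_length _hdom _hpre
  unfold Spec_get_time_series_data_from_a_list
  by_cases hpos : 0 < sequence_length + 1
  · obtain ⟨seqn, hseqn⟩ : ∃ n : Nat, sequence_length = (n : Int) :=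
      ⟨sequence_length.toNat, by omega⟩
    subst hseqn
    obtain ⟨rem, hrem⟩ := foldA_chunks seqn the_list [] []
    rw [foldA_eq, hrem, alt_eq, range_chunksF, range_chunksL]
    simp
  · rw [foldA_eq]
    rw [show the_list.foldl (stepA sequence_length) ([], [], []) = ([] ++ the_list, [], [])
        from foldA_neg sequence_length (by omega) the_list [] [] []]
    unfold get_time_series_data_from_a_list_alt
    simp only [if_neg hpos]
    rw [PySem.List.pyRange_one_eq_nil (le_refl 0)]
    simp
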